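-- pv_equiv track=rewrite | github.com/LVargasE/CS21 | Assignments/A8-model-answer.py | turkeyIrish
-- ===== SOURCE A (Python) =====
-- def turkeyIrish(wordList):
--
--     resultString = ""
--     i = 0
--
--     # Loop that changes each word
--     for word in wordList:
--
--         word = word.lower() #wordList[i].lower()
--         currentWord = ""
--
--         # move through each letter in each word
--         for letter in word:
--
--             if letter in "aeiou":
--                 # add "ab" infron of each vowel
--                 currentWord += "ab" + letter
--             else:
--                 # don't add anything
--                 currentWord += letter
--         # end for loop
--
--         # Add adapted word to the result
--         resultString += currentWord
--
--         # If more words to be added, add a space to the result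
--         if i < len(wordList) + 1:
--             resultString += " "
--
--         i += 1
--     # end for loop
--
--     return resultString
-- ===== SOURCE B (Python) =====
-- def turkeyIrish(wordList):
--     def t(word):
--         word = word.lower()
--         for v in "aeiou":  # 'a' first: the inserted "ab" is never re-scanned by later passes
--             word = word.replace(v, "ab" + v)
--         return word
--     return "".join(t(word) + " " for word in wordList)
-- ===== Notes on version B (the rewrite author's own statement) =====
-- stated objective: idiomatic
-- what changed: Replaced the per-character branch loop and manual index/space bookkeeping with five whole-string str.replace passes per lowercased word ('a' first so the inserted 'ab' is never corrupted) concatenated by ''.join with a trailing space per word.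
import Mathlib
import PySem

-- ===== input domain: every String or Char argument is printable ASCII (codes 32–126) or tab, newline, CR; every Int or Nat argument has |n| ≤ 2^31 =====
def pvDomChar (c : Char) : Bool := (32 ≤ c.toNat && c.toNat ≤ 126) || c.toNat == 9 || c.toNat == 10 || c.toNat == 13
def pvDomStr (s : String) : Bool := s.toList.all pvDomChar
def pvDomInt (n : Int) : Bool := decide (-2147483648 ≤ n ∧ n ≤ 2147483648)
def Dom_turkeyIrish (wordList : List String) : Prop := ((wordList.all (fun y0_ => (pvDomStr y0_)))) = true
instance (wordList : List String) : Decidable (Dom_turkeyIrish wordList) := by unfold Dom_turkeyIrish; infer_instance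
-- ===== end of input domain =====

-- B replaces A's per-character branch loop (and its always-true space condition) with five
-- whole-string replace passes per lowercased word, joined with a trailing space per word (idiomatic).
-- ===== PORT A =====
-- the body of A's outer `for word in wordList` loop; n = len(wordList), state = (resultString, i)
def turkeyIrishLoop (n : Int) (st : List Char × Int) (word : String) : List Char × Int :=
  let w := PySem.Chars.lower word.toList
  let currentWord := w.foldl (fun cur letter =>
    if PySem.Chars.isIn [letter] "aeiou".toList then cur ++ ('a' :: 'b' :: [letter])
    else cur ++ [letter]) []
  let res := st.1 ++ currentWord
  let res := if st.2 < n + 1 then res ++ [' '] else res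
  (res, st.2 + 1)

def turkeyIrish (wordList : List String) : String :=
  String.ofList (wordList.foldl (turkeyIrishLoop (wordList.length : Int)) ([], 0)).1

-- ===== PORT B =====
-- word.lower() then the five replace passes, 'a' first
def tiWord (w : List Char) : List Char :=
  PySem.Chars.replace
    (PySem.Chars.replace
      (PySem.Chars.replace
        (PySem.Chars.replace
          (PySem.Chars.replace (PySem.Chars.lower w) ['a'] ['a','b','a'])
          ['e'] ['a','b','e'])
        ['i'] ['a','b','i'])
      ['o'] ['a','b','o'])
    ['u'] ['a','b','u']

def turkeyIrish_alt (wordList : List String) : String :=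
  String.ofList (PySem.Chars.join [] (wordList.map (fun w => tiWord w.toList ++ [' '])))

-- ===== PRECONDITION & SPEC =====
def Spec_turkeyIrish (wordList : List String) (out : String) : Prop := out = turkeyIrish_alt wordList
instance (wordList : List String) (out : String) : Decidable (Spec_turkeyIrish wordList out) := by unfold Spec_turkeyIrish; infer_instance

-- ===== CLAIM (what is proved, stated in full; the proofs are below) =====
def Claim_equal_turkeyIrish : Prop := ∀ (wordList : List String), Dom_turkeyIrish wordList → Spec_turkeyIrish wordList (turkeyIrish wordList)

-- ===== LEMMAS AND PROOFS =====

-- the per-character A-side transform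
def tiChar (c : Char) : List Char :=
  if PySem.Chars.isIn [c] "aeiou".toList then ['a','b',c] else [c]

-- replace with a single-character pattern is a flatMap
theorem replace_go_single (v : Char) (new : List Char) :
    ∀ (l : List Char) (fuel : Nat) (acc : List Char), l.length ≤ fuel →
      PySem.Chars.replace.go [v] new fuel l acc
        = acc.reverse ++ l.flatMap (fun c => if c = v then new else [c]) := by
  intro l
  induction l with
  | nil =>
    intro fuel acc _
    cases fuel <;> simp [PySem.Chars.replace.go]
  | cons c t ih =>
    intro fuel acc h
    cases fuel with
    | zero => simp at h
    | succ f =>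
      simp only [PySem.Chars.replace.go]
      by_cases hc : v = c
      · subst hc
        simp only [List.isPrefixOf, BEq.rfl, Bool.true_and, if_pos]
        rw [show List.drop ([v].length) (v :: t) = t from rfl,
          ih f (new.reverse ++ acc) (by simpa using h)]
        simp
      · have : [v].isPrefixOf (c :: t) = false := by
          simp [List.isPrefixOf, hc]
        rw [this]
        simp only [Bool.false_eq_true, if_false]
        rw [ih f (c :: acc) (by simpa using Nat.le_of_succ_le_succ h)]
        simp [Ne.symm hc]

theorem replace_single (s : List Char) (v : Char) (new : List Char) :
    PySem.Chars.replace s [v] new = s.flatMap (fun c => if c = v then new else [c]) := by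
  rw [PySem.Chars.replace]
  simp only [List.isEmpty_cons, Bool.false_eq_true, if_false]
  simpa using replace_go_single v new s s.length [] (le_refl _)

-- a character that is not one of the five vowels is not in "aeiou"
theorem isIn_vowels_false (c : Char)
    (ha : c ≠ 'a') (he : c ≠ 'e') (hi : c ≠ 'i') (ho : c ≠ 'o') (hu : c ≠ 'u') :
    PySem.Chars.isIn [c] ['a', 'e', 'i', 'o', 'u'] = false := by
  rw [PySem.Chars.isIn_eq_false_iff]
  intro hinf
  have hmem : c ∈ ['a', 'e', 'i', 'o', 'u'] := hinf.subset (by simp)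
  simp only [List.mem_cons] at hmem
  rcases hmem with h | h | h | h | h | h <;> simp_all

-- the five-pass replace chain equals the per-character transform
theorem tiWord_eq_flatMap (w : List Char) :
    tiWord w = (PySem.Chars.lower w).flatMap tiChar := by
  unfold tiWord
  simp only [replace_single, List.flatMap_assoc]
  apply List.flatMap_congr
  intro c _
  by_cases ha : c = 'a'; · subst ha; decide
  by_cases he : c = 'e'; · subst he; decide
  by_cases hi : c = 'i'; · subst hi; decide
  by_cases ho : c = 'o'; · subst ho; decide
  by_cases hu : c = 'u'; · subst hu; decide
  simp [tiChar, ha, he, hi, ho, hu, isIn_vowels_false c ha he hi ho hu]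

-- A's inner character loop builds the flatMap
theorem inner_loop_eq (w : List Char) (init : List Char) :
    w.foldl (fun cur letter =>
        if PySem.Chars.isIn [letter] "aeiou".toList then cur ++ ('a' :: 'b' :: [letter])
        else cur ++ [letter]) init
      = init ++ w.flatMap tiChar := by
  induction w generalizing init with
  | nil => simp
  | cons c t ih =>
    simp only [List.foldl_cons, List.flatMap_cons, ih, tiChar]
    split <;> simp

-- A's outer loop: while i + (words left) ≤ n + 1, every word gets its trailing space
theorem outer_loop_eq (n : Int) (ws : List String) :
    ∀ (acc : List Char) (i : Int), i + ws.length ≤ n + 1 →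
      ws.foldl (turkeyIrishLoop n) (acc, i)
        = (acc ++ (ws.map (fun w => (PySem.Chars.lower w.toList).flatMap tiChar ++ [' '])).flatten,
           i + ws.length) := by
  induction ws with
  | nil => intro acc i _; simp
  | cons w t ih =>
    intro acc i h
    simp only [List.length_cons] at h
    have hi : i < n + 1 := by
      have : (0 : Int) ≤ t.length := Int.natCast_nonneg _
      push_cast at h ⊢
      omega
    have hstep : turkeyIrishLoop n (acc, i) w
        = (acc ++ ((PySem.Chars.lower w.toList).flatMap tiChar ++ [' ']), i + 1) := by
      have hin : i ≤ n := by omega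
      simp only [turkeyIrishLoop]
      rw [inner_loop_eq]
      simp [hin]
    rw [List.foldl_cons, hstep, ih _ (i + 1) (by push_cast at h ⊢; omega)]
    simp only [List.map_cons, List.flatten_cons, List.length_cons, Prod.mk.injEq]
    refine ⟨by simp, by push_cast; ring⟩

theorem join_nil_eq_flatten (parts : List (List Char)) :
    PySem.Chars.join [] parts = parts.flatten := by
  induction parts with
  | nil => rfl
  | cons p t ih =>
    cases t <;> simp_all [PySem.Chars.join, List.intercalate, List.intersperse]

-- ===== VERDICT (by name: the statement is the Claim_ definition above) =====
theorem turkeyIrish_spec : Claim_equal_turkeyIrish := by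
  intro wordList _
  unfold Spec_turkeyIrish turkeyIrish turkeyIrish_alt
  rw [outer_loop_eq (wordList.length : Int) wordList [] 0 (by omega)]
  simp only [join_nil_eq_flatten, List.nil_append]
  congr 1
  apply congrArg
  apply List.map_congr_left
  intro w _
  rw [tiWord_eq_flatMap]
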